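-- pv_equiv track=rewrite | github.com/mohanwugupta/VendoMini | scripts/analyze/scripts/extract_model_goals.py | categorize_goal_action
-- ===== SOURCE A (Python) =====
-- def categorize_goal_action(tool_calls, message_content):
--     """Categorize the type of goal-oriented action based on tool calls and content"""
--     if not tool_calls and not message_content:
--         return "none"
--
--     content_lower = message_content.lower() if message_content else ""
--     tools_str = " ".join(tool_calls).lower() if tool_calls else ""
--
--     # Financial monitoring actions
--     if "get_money_balance" in tools_str or any(word in content_lower for word in ["balance", "money", "funds", "budget"]):
--         return "financial_monitoring"
--
--     # Inventory management actions
--     if any(tool in tools_str for tool in ["get_machine_inventory", "check_storage_quantities", "list_storage_products"]):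
--         return "inventory_management"
--
--     # Sales/pricing actions
--     if any(word in content_lower for word in ["price", "pricing", "cost", "sell", "sales", "revenue"]):
--         return "pricing_strategy"
--
--     # Market research actions
--     if "ai_web_search" in tools_str or any(word in content_lower for word in ["research", "market", "competitor", "demand"]):
--         return "market_research"
--
--     # Customer communication actions
--     if any(tool in tools_str for tool in ["read_email", "send_email", "read_email_inbox"]):
--         return "customer_communication"
--
--     # Planning/strategy actions
--     if any(tool in tools_str for tool in ["write_scratchpad", "read_scratchpad"]) or any(word in content_lower for word in ["plan", "strategy", "goal", "objective"]):
--         return "strategic_planning"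
--
--     # Operational actions
--     if "wait_for_next_day" in tools_str:
--         return "operational"
--
--     # Analysis actions
--     if any(word in content_lower for word in ["analyze", "analysis", "evaluate", "assess", "performance"]):
--         return "analysis"
--
--     return "other"
-- ===== SOURCE B (Python) =====
-- # Flat keyword->priority tables; the answer is the label with the smallest
-- # matched priority (exhaustive scan + min aggregation, no branch cascade).
-- _TOOL_PRIO = {
--     "get_money_balance": 0,
--     "get_machine_inventory": 1, "check_storage_quantities": 1, "list_storage_products": 1,
--     "ai_web_search": 3,
--     "read_email": 4, "send_email": 4, "read_email_inbox": 4,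
--     "write_scratchpad": 5, "read_scratchpad": 5,
--     "wait_for_next_day": 6,
-- }
-- _WORD_PRIO = {
--     "balance": 0, "money": 0, "funds": 0, "budget": 0,
--     "price": 2, "pricing": 2, "cost": 2, "sell": 2, "sales": 2, "revenue": 2,
--     "research": 3, "market": 3, "competitor": 3, "demand": 3,
--     "plan": 5, "strategy": 5, "goal": 5, "objective": 5,
--     "analyze": 7, "analysis": 7, "evaluate": 7, "assess": 7, "performance": 7,
-- }
-- _LABELS = ["financial_monitoring", "inventory_management", "pricing_strategy",
--            "market_research", "customer_communication", "strategic_planning",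
--            "operational", "analysis", "other"]
--
-- def categorize_goal_action(tool_calls, message_content):
--     """Categorize the type of goal-oriented action based on tool calls and content"""
--     if not tool_calls and not message_content:
--         return "none"
--     content = message_content.lower() if message_content else ""
--     tools = " ".join(tool_calls).lower() if tool_calls else ""
--     best = len(_LABELS) - 1
--     for sub, p in _TOOL_PRIO.items():
--         if sub in tools:
--             best = min(best, p)
--     for word, p in _WORD_PRIO.items():
--         if word in content:
--             best = min(best, p)
--     return _LABELS[best]
-- ===== Notes on version B (the rewrite author's own statement) =====
-- stated objective: alternative
-- what changed: Replaces the first-match if-cascade with two flat keyword-to-priority tables scanned exhaustively, aggregating the minimum matched priority and indexing a label array, instead of returning at the first matching branch.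
import Mathlib
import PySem

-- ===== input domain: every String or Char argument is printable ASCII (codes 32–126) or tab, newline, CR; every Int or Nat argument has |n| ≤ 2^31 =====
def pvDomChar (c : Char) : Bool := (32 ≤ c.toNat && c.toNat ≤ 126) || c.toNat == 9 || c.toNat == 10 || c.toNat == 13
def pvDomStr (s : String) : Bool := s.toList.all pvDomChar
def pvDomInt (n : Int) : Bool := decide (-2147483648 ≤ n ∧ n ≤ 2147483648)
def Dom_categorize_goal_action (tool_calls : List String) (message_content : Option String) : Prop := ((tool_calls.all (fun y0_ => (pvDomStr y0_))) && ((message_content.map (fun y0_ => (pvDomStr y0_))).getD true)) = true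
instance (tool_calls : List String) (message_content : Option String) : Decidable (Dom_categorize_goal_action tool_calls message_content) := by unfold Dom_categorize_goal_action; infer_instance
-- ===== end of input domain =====

-- B replaces A's first-match branch cascade by an exhaustive min-priority aggregation over
-- flat keyword->priority tables, indexing a label array with the minimum (objective: alternative).

-- ===== PORT A =====
-- Python truthiness of message_content: None or "" is falsy
def pvContentTruthy (message_content : Option String) : Bool :=
  match message_content with
  | none => false
  | some s => !(s == "")

def categorize_goal_action (tool_calls : List String) (message_content : Option String) : String :=
  if tool_calls == [] && !(pvContentTruthy message_content) then "none"
  else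
    let content_lower := if pvContentTruthy message_content then PySem.Str.lower (message_content.getD "") else ""
    let tools_str := if !(tool_calls == []) then PySem.Str.lower (PySem.Str.join " " tool_calls) else ""
    if PySem.Str.isIn "get_money_balance" tools_str
        || (["balance", "money", "funds", "budget"].any (fun w => PySem.Str.isIn w content_lower)) then
      "financial_monitoring"
    else if ["get_machine_inventory", "check_storage_quantities", "list_storage_products"].any
        (fun t => PySem.Str.isIn t tools_str) then
      "inventory_management"
    else if ["price", "pricing", "cost", "sell", "sales", "revenue"].any
        (fun w => PySem.Str.isIn w content_lower) then
      "pricing_strategy"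
    else if PySem.Str.isIn "ai_web_search" tools_str
        || (["research", "market", "competitor", "demand"].any (fun w => PySem.Str.isIn w content_lower)) then
      "market_research"
    else if ["read_email", "send_email", "read_email_inbox"].any (fun t => PySem.Str.isIn t tools_str) then
      "customer_communication"
    else if (["write_scratchpad", "read_scratchpad"].any (fun t => PySem.Str.isIn t tools_str))
        || (["plan", "strategy", "goal", "objective"].any (fun w => PySem.Str.isIn w content_lower)) then
      "strategic_planning"
    else if PySem.Str.isIn "wait_for_next_day" tools_str then
      "operational"
    else if ["analyze", "analysis", "evaluate", "assess", "performance"].any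
        (fun w => PySem.Str.isIn w content_lower) then
      "analysis"
    else "other"

-- ===== PORT B =====
def pvToolPrio : List (String × Nat) :=
  [("get_money_balance", 0),
   ("get_machine_inventory", 1), ("check_storage_quantities", 1), ("list_storage_products", 1),
   ("ai_web_search", 3),
   ("read_email", 4), ("send_email", 4), ("read_email_inbox", 4),
   ("write_scratchpad", 5), ("read_scratchpad", 5),
   ("wait_for_next_day", 6)]

def pvWordPrio : List (String × Nat) :=
  [("balance", 0), ("money", 0), ("funds", 0), ("budget", 0),
   ("price", 2), ("pricing", 2), ("cost", 2), ("sell", 2), ("sales", 2), ("revenue", 2),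
   ("research", 3), ("market", 3), ("competitor", 3), ("demand", 3),
   ("plan", 5), ("strategy", 5), ("goal", 5), ("objective", 5),
   ("analyze", 7), ("analysis", 7), ("evaluate", 7), ("assess", 7), ("performance", 7)]

def pvLabels : List String :=
  ["financial_monitoring", "inventory_management", "pricing_strategy",
   "market_research", "customer_communication", "strategic_planning",
   "operational", "analysis", "other"]

-- the two python 'for' loops: fold the table, keeping the minimum matched priority
def pvBest (pairs : List (String × Nat)) (hay : String) (b : Nat) : Nat :=
  pairs.foldl (fun best sp => if PySem.Str.isIn sp.1 hay then min best sp.2 else best) b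

def categorize_goal_action_alt (tool_calls : List String) (message_content : Option String) : String :=
  if tool_calls == [] && !(pvContentTruthy message_content) then "none"
  else
    let content := if pvContentTruthy message_content then PySem.Str.lower (message_content.getD "") else ""
    let tools := if !(tool_calls == []) then PySem.Str.lower (PySem.Str.join " " tool_calls) else ""
    let best := pvBest pvWordPrio content (pvBest pvToolPrio tools (pvLabels.length - 1))
    pvLabels.getD best "other"

-- ===== PRECONDITION & SPEC =====
def Spec_categorize_goal_action (tool_calls : List String) (message_content : Option String) (out : String) : Prop := out = categorize_goal_action_alt tool_calls message_content
instance (tool_calls : List String) (message_content : Option String) (out : String) : Decidable (Spec_categorize_goal_action tool_calls message_content out) := by unfold Spec_categorize_goal_action; infer_instance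

-- ===== CLAIM (what is proved, stated in full; the proofs are below) =====
def Claim_equal_categorize_goal_action : Prop := ∀ (tool_calls : List String) (message_content : Option String), Dom_categorize_goal_action tool_calls message_content → Spec_categorize_goal_action tool_calls message_content (categorize_goal_action tool_calls message_content)

-- ===== LEMMAS AND PROOFS =====
-- one fold step over a whole priority group
def pvStep (c : Bool) (p b : Nat) : Nat := if c then min b p else b

theorem pvBest_append (xs ys : List (String × Nat)) (hay : String) (b : Nat) :
    pvBest (xs ++ ys) hay b = pvBest ys hay (pvBest xs hay b) := by
  simp [pvBest, List.foldl_append]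

theorem pvBest_uniform (ss : List String) (p : Nat) (hay : String) (b : Nat) :
    pvBest (ss.map (fun s => (s, p))) hay b
      = pvStep (ss.any (fun s => PySem.Str.isIn s hay)) p b := by
  induction ss generalizing b with
  | nil => simp [pvBest, pvStep]
  | cons s rest ih =>
    rw [show pvBest ((s :: rest).map (fun s => (s, p))) hay b
          = pvBest (rest.map (fun s => (s, p))) hay
              (if PySem.Str.isIn s hay then min b p else b) from rfl, ih]
    cases h : PySem.Str.isIn s hay <;>
      cases h2 : rest.any (fun s => PySem.Str.isIn s hay) <;>
      simp only [pvStep, List.any_cons, h, h2, Bool.or_false,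
        Bool.or_true, if_true, if_false, Bool.false_eq_true] <;> omega

-- boolean core: min-priority aggregation equals the first-match cascade
theorem pvKey (T0 T1 T3 T4 T5 T6 W0 W2 W3 W5 W7 : Bool) :
    pvLabels.getD
      (pvStep W7 7 (pvStep W5 5 (pvStep W3 3 (pvStep W2 2 (pvStep W0 0
        (pvStep T6 6 (pvStep T5 5 (pvStep T4 4 (pvStep T3 3 (pvStep T1 1 (pvStep T0 0 8))))))))))) "other"
    = (if T0 || W0 then "financial_monitoring"
       else if T1 then "inventory_management"
       else if W2 then "pricing_strategy"
       else if T3 || W3 then "market_research"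
       else if T4 then "customer_communication"
       else if T5 || W5 then "strategic_planning"
       else if T6 then "operational"
       else if W7 then "analysis"
       else "other") := by
  cases T0 <;> cases T1 <;> cases T3 <;> cases T4 <;> cases T5 <;> cases T6 <;>
    cases W0 <;> cases W2 <;> cases W3 <;> cases W5 <;> cases W7 <;> rfl

theorem pvBestLabel_eq (ts cl : String) :
    pvLabels.getD (pvBest pvWordPrio cl (pvBest pvToolPrio ts (pvLabels.length - 1))) "other"
    = (if PySem.Str.isIn "get_money_balance" ts
          || (["balance", "money", "funds", "budget"].any (fun w => PySem.Str.isIn w cl)) then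
        "financial_monitoring"
      else if ["get_machine_inventory", "check_storage_quantities", "list_storage_products"].any
          (fun t => PySem.Str.isIn t ts) then
        "inventory_management"
      else if ["price", "pricing", "cost", "sell", "sales", "revenue"].any
          (fun w => PySem.Str.isIn w cl) then
        "pricing_strategy"
      else if PySem.Str.isIn "ai_web_search" ts
          || (["research", "market", "competitor", "demand"].any (fun w => PySem.Str.isIn w cl)) then
        "market_research"
      else if ["read_email", "send_email", "read_email_inbox"].any (fun t => PySem.Str.isIn t ts) then
        "customer_communication"
      else if (["write_scratchpad", "read_scratchpad"].any (fun t => PySem.Str.isIn t ts))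
          || (["plan", "strategy", "goal", "objective"].any (fun w => PySem.Str.isIn w cl)) then
        "strategic_planning"
      else if PySem.Str.isIn "wait_for_next_day" ts then
        "operational"
      else if ["analyze", "analysis", "evaluate", "assess", "performance"].any
          (fun w => PySem.Str.isIn w cl) then
        "analysis"
      else "other") := by
  have ht : pvToolPrio =
      (["get_money_balance"].map (fun s => (s, 0)))
      ++ (["get_machine_inventory", "check_storage_quantities", "list_storage_products"].map (fun s => (s, 1)))
      ++ (["ai_web_search"].map (fun s => (s, 3)))
      ++ (["read_email", "send_email", "read_email_inbox"].map (fun s => (s, 4)))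
      ++ (["write_scratchpad", "read_scratchpad"].map (fun s => (s, 5)))
      ++ (["wait_for_next_day"].map (fun s => (s, 6))) := rfl
  have hw : pvWordPrio =
      (["balance", "money", "funds", "budget"].map (fun s => (s, 0)))
      ++ (["price", "pricing", "cost", "sell", "sales", "revenue"].map (fun s => (s, 2)))
      ++ (["research", "market", "competitor", "demand"].map (fun s => (s, 3)))
      ++ (["plan", "strategy", "goal", "objective"].map (fun s => (s, 5)))
      ++ (["analyze", "analysis", "evaluate", "assess", "performance"].map (fun s => (s, 7))) := rfl
  have hl : pvLabels.length - 1 = 8 := rfl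
  rw [ht, hw, hl]
  simp only [pvBest_append, pvBest_uniform]
  rw [pvKey]
  simp only [List.any_cons, List.any_nil, Bool.or_false]

-- ===== VERDICT (by name: the statement is the Claim_ definition above) =====
theorem categorize_goal_action_spec : Claim_equal_categorize_goal_action := by
  intro tool_calls message_content _
  unfold Spec_categorize_goal_action categorize_goal_action categorize_goal_action_alt
  cases h : (tool_calls == [] && !pvContentTruthy message_content) with
  | true => simp only [if_true]
  | false =>
    simp only [Bool.false_eq_true, if_false]
    exact (pvBestLabel_eq _ _).symm
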